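-- pv_equiv track=rewrite | github.com/gggg8657/AI_CCTV_final | src/pipeline/multi_camera.py | _are_locations_nearby
-- ===== SOURCE A (Python) =====
-- def _are_locations_nearby(loc1: str, loc2: str) -> bool:
--     """위치가 인접한지 확인 (간단한 구현)"""
--     # TODO: 실제 위치 좌표를 사용한 거리 계산
--     # 현재는 이름 기반 간단한 판단
--     location_groups = {
--         'entrance': ['entrance', 'lobby', 'reception'],
--         'parking': ['parking', 'lot', 'garage'],
--         'hallway': ['hallway', 'corridor', 'passage'],
--     }
--
--     for group in location_groups.values():
--         if loc1.lower() in group and loc2.lower() in group: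
--             return True
--
--     return False
-- ===== SOURCE B (Python) =====
-- def _are_locations_nearby(loc1: str, loc2: str) -> bool:
--     """위치가 인접한지 확인 (간단한 구현)"""
--     location_groups = {
--         'entrance': ['entrance', 'lobby', 'reception'],
--         'parking': ['parking', 'lot', 'garage'],
--         'hallway': ['hallway', 'corridor', 'passage'],
--     }
--     # reverse index: location name -> its group key
--     index = {}
--     for key, names in location_groups.items():
--         for name in names:
--             index[name] = key
--     g1 = index.get(loc1.lower())
--     return g1 is not None and g1 == index.get(loc2.lower())
-- ===== Notes on version B (the rewrite author's own statement) =====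
-- stated objective: idiomatic
-- what changed: Replaces the scan over the groups (membership-testing both names in each group list) with a reverse index dict built once from name to group key, followed by two direct lookups and an equality test guarded against both names being unknown.
import Mathlib
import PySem

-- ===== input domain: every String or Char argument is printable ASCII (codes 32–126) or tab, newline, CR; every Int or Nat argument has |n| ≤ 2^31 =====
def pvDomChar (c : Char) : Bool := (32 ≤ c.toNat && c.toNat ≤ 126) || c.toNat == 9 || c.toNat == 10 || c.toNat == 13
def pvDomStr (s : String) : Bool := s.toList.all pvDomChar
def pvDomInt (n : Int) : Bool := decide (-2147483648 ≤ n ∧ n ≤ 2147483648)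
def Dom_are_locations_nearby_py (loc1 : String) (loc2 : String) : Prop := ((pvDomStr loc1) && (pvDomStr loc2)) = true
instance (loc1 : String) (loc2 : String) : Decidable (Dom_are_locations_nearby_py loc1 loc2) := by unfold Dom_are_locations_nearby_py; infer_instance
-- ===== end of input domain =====

-- ===== PORT A =====
-- B replaces A's scan over group lists with a reverse index (name -> group key) and two lookups; idiomatic, same cost.
def pvGroups : PySem.Dict String (List String) :=
  PySem.Dict.ofList
    [("entrance", ["entrance", "lobby", "reception"]),
     ("parking", ["parking", "lot", "garage"]),
     ("hallway", ["hallway", "corridor", "passage"])]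

def are_locations_nearby_py (loc1 : String) (loc2 : String) : Bool :=
  let location_groups := pvGroups
  -- 'for group in …values(): if … and …: return True' / 'return False' = any over the values
  (PySem.Dict.values location_groups).any (fun group =>
    group.contains (PySem.Str.lower loc1) && group.contains (PySem.Str.lower loc2))

-- ===== PORT B =====
def are_locations_nearby_py_alt (loc1 : String) (loc2 : String) : Bool :=
  let location_groups := pvGroups
  -- index = {}; for key, names in location_groups.items(): for name in names: index[name] = key
  let index : PySem.Dict String String :=
    (PySem.Dict.items location_groups).foldl
      (fun idx kv => kv.2.foldl (fun idx name => idx.insert name kv.1) idx)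
      PySem.Dict.empty
  let g1 := PySem.Dict.get? index (PySem.Str.lower loc1)
  g1.isSome && (g1 == PySem.Dict.get? index (PySem.Str.lower loc2))

-- ===== PRECONDITION & SPEC =====
def Spec_are_locations_nearby_py (loc1 : String) (loc2 : String) (out : Bool) : Prop := out = are_locations_nearby_py_alt loc1 loc2
instance (loc1 : String) (loc2 : String) (out : Bool) : Decidable (Spec_are_locations_nearby_py loc1 loc2 out) := by unfold Spec_are_locations_nearby_py; infer_instance

-- ===== CLAIM (what is proved, stated in full; the proofs are below) =====
def Claim_equal_are_locations_nearby_py : Prop := ∀ (loc1 : String) (loc2 : String), Dom_are_locations_nearby_py loc1 loc2 → Spec_are_locations_nearby_py loc1 loc2 (are_locations_nearby_py loc1 loc2)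

-- ===== LEMMAS AND PROOFS =====

-- ===== VERDICT (by name: the statement is the Claim_ definition above) =====
def pvIndex : PySem.Dict String String :=
  (PySem.Dict.items pvGroups).foldl
    (fun idx kv => kv.2.foldl (fun idx name => idx.insert name kv.1) idx)
    PySem.Dict.empty

def grp (s : String) : Option String :=
  if s = "entrance" ∨ s = "lobby" ∨ s = "reception" then some "entrance"
  else if s = "parking" ∨ s = "lot" ∨ s = "garage" then some "parking"
  else if s = "hallway" ∨ s = "corridor" ∨ s = "passage" then some "hallway"
  else none

lemma pvIndex_get (s : String) : pvIndex.get? s = grp s := by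
  rw [show pvIndex = PySem.Dict.mk
      [("entrance", "entrance"), ("lobby", "entrance"), ("reception", "entrance"),
       ("parking", "parking"), ("lot", "parking"), ("garage", "parking"),
       ("hallway", "hallway"), ("corridor", "hallway"), ("passage", "hallway")] from rfl]
  have hemp : (PySem.Dict.mk ([] : List (String × String))).get? s = none := rfl
  simp only [PySem.Dict.get?_mk_cons, grp, hemp]
  split_ifs <;> simp_all <;> simp_all [eq_comm]

lemma mem_grp (s : String) :
    (s == "entrance" || (s == "lobby" || s == "reception")) = (grp s == some "entrance")
    ∧ (s == "parking" || (s == "lot" || s == "garage")) = (grp s == some "parking")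
    ∧ (s == "hallway" || (s == "corridor" || s == "passage")) = (grp s == some "hallway") := by
  unfold grp
  by_cases h1 : s = "entrance" ∨ s = "lobby" ∨ s = "reception"
  · rcases h1 with h | h | h <;> subst h <;> simp
  · by_cases h2 : s = "parking" ∨ s = "lot" ∨ s = "garage"
    · rcases h2 with h | h | h <;> subst h <;> simp
    · by_cases h3 : s = "hallway" ∨ s = "corridor" ∨ s = "passage"
      · rcases h3 with h | h | h <;> subst h <;> simp
      · push Not at h1 h2 h3
        simp [h1.1, h1.2.1, h1.2.2, h2.1, h2.2.1, h2.2.2, h3.1, h3.2.1, h3.2.2]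

lemma grp_cases (s : String) :
    grp s = none ∨ grp s = some "entrance" ∨ grp s = some "parking" ∨ grp s = some "hallway" := by
  unfold grp; split_ifs <;> simp

lemma pv_key (s t : String) :
    ((PySem.Dict.values pvGroups).any (fun group => group.contains s && group.contains t)) =
    ((PySem.Dict.get? pvIndex s).isSome && (PySem.Dict.get? pvIndex s == PySem.Dict.get? pvIndex t)) := by
  rw [show PySem.Dict.values pvGroups =
      [["entrance", "lobby", "reception"], ["parking", "lot", "garage"],
       ["hallway", "corridor", "passage"]] from rfl,
     pvIndex_get s, pvIndex_get t]
  simp only [List.any_cons, List.any_nil, List.contains_cons, List.contains_nil,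
    Bool.or_false]
  rw [(mem_grp s).1, (mem_grp s).2.1, (mem_grp s).2.2,
      (mem_grp t).1, (mem_grp t).2.1, (mem_grp t).2.2]
  rcases grp_cases s with h | h | h | h <;> rcases grp_cases t with h' | h' | h' | h' <;>
    rw [h, h'] <;> decide

theorem are_locations_nearby_py_spec : Claim_equal_are_locations_nearby_py := by
  intro loc1 loc2 _
  unfold Spec_are_locations_nearby_py are_locations_nearby_py are_locations_nearby_py_alt
  exact pv_key (PySem.Str.lower loc1) (PySem.Str.lower loc2)
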